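-- pv_equiv track=rewrite | github.com/plume-design/opensync-fut-base | framework/tools/functions.py | get_config_opts
-- ===== SOURCE A (Python) =====
-- fut_test_config_opts = [
--     'test_script_timeout',
--     'skip',
--     'skip_msg',
--     'xfail',
--     'xfail_msg',
--     'ignore_collect',
-- ]
--
-- def get_config_opts(config):
--     """Iterate over test configurations and return dictionary of options.
--
--     Dictionary is made of present test options from fut_test_config_opts list.
--
--     Args:
--         config (dict): Dictionary to iterate through
--
--     Returns:
--         (dict): _description_
--     """
--     if not isinstance(config, dict):
--         return {}
--     try:
--         fut_opts = {}
--         for topt in fut_test_config_opts: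
--             if topt in config:
--                 fut_opts[topt] = config[topt]
--         return fut_opts
--     except Exception:
--         return {}
-- ===== SOURCE B (Python) =====
-- fut_test_config_opts = [
--     'test_script_timeout',
--     'skip',
--     'skip_msg',
--     'xfail',
--     'xfail_msg',
--     'ignore_collect',
-- ]
--
-- def get_config_opts(config):
--     if not isinstance(config, dict):
--         return {}
--     rank = {k: i for i, k in enumerate(fut_test_config_opts)}
--     hits = sorted(((rank[k], k, v) for k, v in config.items() if k in rank),
--                   key=lambda t: t[0])
--     return {k: v for _, k, v in hits}
-- ===== Notes on version B (the rewrite author's own statement) =====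
-- stated objective: alternative
-- what changed: B builds a key->rank index, makes one filtering pass over config collecting (rank, key, value) triples, stably sorts them by rank, and rebuilds the dict from the sorted triples, instead of A's probe loop over the fixed option list.
import Mathlib
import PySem

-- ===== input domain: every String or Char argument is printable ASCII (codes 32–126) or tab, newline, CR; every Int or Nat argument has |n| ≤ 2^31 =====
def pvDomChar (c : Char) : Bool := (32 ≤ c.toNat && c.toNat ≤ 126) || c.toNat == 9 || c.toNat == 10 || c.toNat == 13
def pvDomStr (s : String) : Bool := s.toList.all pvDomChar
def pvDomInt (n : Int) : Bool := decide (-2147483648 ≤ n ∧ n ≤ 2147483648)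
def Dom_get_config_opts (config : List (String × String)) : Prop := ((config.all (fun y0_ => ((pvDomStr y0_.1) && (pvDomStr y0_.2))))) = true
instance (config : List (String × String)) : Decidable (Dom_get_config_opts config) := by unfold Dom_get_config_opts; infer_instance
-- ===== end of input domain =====

-- B replaces A's probe loop over the fixed key list by a rank index + one filtering pass over config
-- + a stable sort by rank; objective: alternative driver/algorithm (filter-then-sort).
-- ===== PORT A =====
def futTestConfigOpts : List String :=
  ["test_script_timeout", "skip", "skip_msg", "xfail", "xfail_msg", "ignore_collect"]

-- A: for topt in fut_test_config_opts: if topt in config: fut_opts[topt] = config[topt]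
-- ('topt in config' + 'config[topt]' = one first-match lookup; guard guarantees it is some)
def get_config_opts (config : List (String × String)) : List (String × String) :=
  (futTestConfigOpts.foldl (fun futOpts topt =>
      match (PySem.Dict.mk config).get? topt with
      | some v => futOpts.insert topt v
      | none => futOpts)
    (PySem.Dict.empty : PySem.Dict String String)).items

-- ===== PORT B =====
-- B: rank = {k: i for i, k in enumerate(opts)}; hits = sorted(filtered triples, key=rank);
-- result dict rebuilt from the sorted triples. (rank[k] is guarded by 'k in rank', so getD is exact.)
def get_config_opts_alt (config : List (String × String)) : List (String × String) :=
  let rank : PySem.Dict String Int :=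
    (PySem.List.enumerate futTestConfigOpts).foldl (fun d p => d.insert p.2 p.1)
      (PySem.Dict.empty : PySem.Dict String Int)
  let hits : List (Int × String × String) :=
    PySem.List.sorted
      (config.filterMap (fun kv =>
        if rank.contains kv.1 then some (rank.getD kv.1 0, kv.1, kv.2) else none))
      (fun t => t.1) false
  (hits.foldl (fun d t => d.insert t.2.1 t.2.2)
    (PySem.Dict.empty : PySem.Dict String String)).items

-- ===== PRECONDITION & SPEC =====
-- Pre_ excludes association lists with duplicate keys: they represent no Python dict (A's declared
-- parameter type), so A is never run on them; on them first-vs-last value choice is accidental.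
def Pre_get_config_opts (config : List (String × String)) : Prop :=
  (config.map Prod.fst).Nodup
instance (config : List (String × String)) : Decidable (Pre_get_config_opts config) := by
  unfold Pre_get_config_opts; infer_instance

def pvWitness_get_config_opts : (List (String × String)) := [("skip", "1"), ("foo", "bar")]

def Spec_get_config_opts (config : List (String × String)) (out : List (String × String)) : Prop := out = get_config_opts_alt config
instance (config : List (String × String)) (out : List (String × String)) : Decidable (Spec_get_config_opts config out) := by unfold Spec_get_config_opts; infer_instance

-- ===== CLAIM (what is proved, stated in full; the proofs are below) =====
def Claim_equal_get_config_opts : Prop := ∀ (config : List (String × String)), Dom_get_config_opts config → Pre_get_config_opts config → Spec_get_config_opts config (get_config_opts config)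


-- ===== LEMMAS AND PROOFS =====

-- the common canonical value: options present in config, in fixed option order
def pvC (config : List (String × String)) : List (String × String) :=
  futTestConfigOpts.filterMap
    (fun k => ((PySem.Dict.mk config).get? k).map (fun v => (k, v)))

-- the canonical (rank, key, value) triples B's sort produces
def pvCanon (config : List (String × String)) : List (Int × String × String) :=
  (PySem.List.enumerate futTestConfigOpts).filterMap
    (fun p => ((PySem.Dict.mk config).get? p.2).map (fun v => (p.1, p.2, v)))

-- the rank index as a literal dict
def pvRank : PySem.Dict String Int :=
  PySem.Dict.mk [("test_script_timeout",0),("skip",1),("skip_msg",2),("xfail",3),("xfail_msg",4),("ignore_collect",5)]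

theorem pv_rank_fold_eq :
    (PySem.List.enumerate futTestConfigOpts).foldl (fun d p => d.insert p.2 p.1)
      (PySem.Dict.empty : PySem.Dict String Int) = pvRank := by decide

-- membership in the enumeration of the option list, phrased through the rank dict
theorem pv_enum_char (i : Int) (k : String) :
    (i, k) ∈ PySem.List.enumerate futTestConfigOpts 0 ↔
      (pvRank.contains k = true ∧ i = pvRank.getD k 0) := by
  simp [PySem.List.enumerate, futTestConfigOpts, pvRank, PySem.Dict.contains,
    PySem.Dict.getD, PySem.Dict.get?, Prod.ext_iff]
  constructor
  · rintro (⟨hi,hk⟩|⟨hi,hk⟩|⟨hi,hk⟩|⟨hi,hk⟩|⟨hi,hk⟩|⟨hi,hk⟩) <;> subst hi hk <;> simp [List.find?]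
  · rintro ⟨(hk|hk|hk|hk|hk|hk), hi⟩ <;> subst hk <;> simp [List.find?] at hi <;> simp [hi]

-- A's probe loop over fresh distinct keys appends exactly the present options
theorem pv_foldA (config : List (String × String)) (ks : List String)
    (d : PySem.Dict String String) (hnd : ks.Nodup)
    (hfresh : ∀ k ∈ ks, d.contains k = false) :
    (ks.foldl (fun futOpts topt =>
        match (PySem.Dict.mk config).get? topt with
        | some v => futOpts.insert topt v
        | none => futOpts) d).items
      = d.items ++ ks.filterMap (fun k => ((PySem.Dict.mk config).get? k).map (fun v => (k, v))) := by
  induction ks generalizing d with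
  | nil => simp
  | cons k ks ih =>
    rw [List.nodup_cons] at hnd
    obtain ⟨hk, hnd'⟩ := hnd
    simp only [List.foldl_cons, List.filterMap_cons]
    cases hg : (PySem.Dict.mk config).get? k with
    | none =>
      simp only [Option.map_none]
      exact ih d hnd' (fun k' hk' => hfresh k' (List.mem_cons_of_mem _ hk'))
    | some v =>
      simp only [Option.map_some]
      rw [ih (d.insert k v) hnd' ?_, PySem.Dict.items_insert_of_not_contains d v
        (hfresh k List.mem_cons_self)]
      · simp
      · intro k' hk'
        rw [PySem.Dict.contains_insert]
        have hne : k' ≠ k := fun h => hk (h ▸ hk')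
        simp [hne, hfresh k' (List.mem_cons_of_mem _ hk')]

theorem pv_A_eq_C (config : List (String × String)) :
    get_config_opts config = pvC config := by
  unfold get_config_opts pvC
  rw [pv_foldA config futTestConfigOpts PySem.Dict.empty (by decide) (by simp)]
  rfl

-- projecting the canonical triples back to (key, value) pairs gives pvC
theorem pv_canon_proj (config : List (String × String)) (l : List String) (s : Int) :
    ((PySem.List.enumerate l s).filterMap
        (fun p => ((PySem.Dict.mk config).get? p.2).map (fun v => (p.1, p.2, v)))).map
      (fun t => (t.2.1, t.2.2))
    = l.filterMap (fun k => ((PySem.Dict.mk config).get? k).map (fun v => (k, v))) := by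
  induction l generalizing s with
  | nil => simp [PySem.List.enumerate_nil]
  | cons k l ih =>
    rw [PySem.List.enumerate_cons]
    simp only [List.filterMap_cons]
    cases (PySem.Dict.mk config).get? k <;> simp [ih]

-- the keys of the canonical triples: present options, in option-list order
theorem pv_canon_keys (config : List (String × String)) (l : List String) (s : Int) :
    ((PySem.List.enumerate l s).filterMap
        (fun p => ((PySem.Dict.mk config).get? p.2).map (fun v => (p.1, p.2, v)))).map
      (fun t => t.2.1)
    = l.filter (fun k => ((PySem.Dict.mk config).get? k).isSome) := by
  induction l generalizing s with
  | nil => simp [PySem.List.enumerate_nil]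
  | cons k l ih =>
    rw [PySem.List.enumerate_cons]
    simp only [List.filterMap_cons, List.filter_cons]
    cases (PySem.Dict.mk config).get? k <;> simp [ih]

theorem pv_canon_keys_nodup (config : List (String × String)) :
    ((pvCanon config).map (fun t => t.2.1)).Nodup := by
  unfold pvCanon
  rw [pv_canon_keys]
  exact List.filter_sublist.nodup (by decide)

theorem pv_canon_pairwise (config : List (String × String)) :
    (pvCanon config).Pairwise (fun a b => a.1 < b.1) := by
  unfold pvCanon
  rw [List.pairwise_filterMap]
  refine (PySem.List.pairwise_lt_enumerate futTestConfigOpts 0).imp ?_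
  intro a b hab x hx y hy
  simp only [Option.map_eq_some_iff] at hx hy
  obtain ⟨vx, -, rfl⟩ := hx
  obtain ⟨vy, -, rfl⟩ := hy
  exact hab

-- first-match lookup in a duplicate-free association list is membership
theorem pv_get?_iff_mem (config : List (String × String)) (hpre : Pre_get_config_opts config)
    (k v : String) :
    (PySem.Dict.mk config).get? k = some v ↔ (k, v) ∈ config := by
  rw [PySem.Dict.get?_eq_some_iff_mem_items (PySem.Dict.mk config) k v (by simpa using hpre)]

-- membership in B's filtered pass
theorem pv_mem_hits (config : List (String × String)) (t : Int × String × String) :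
    t ∈ config.filterMap (fun kv =>
        if pvRank.contains kv.1 then some (pvRank.getD kv.1 0, kv.1, kv.2) else none)
      ↔ (pvRank.contains t.2.1 = true ∧ t.1 = pvRank.getD t.2.1 0 ∧ (t.2.1, t.2.2) ∈ config) := by
  obtain ⟨i, k, v⟩ := t
  simp only [List.mem_filterMap]
  constructor
  · rintro ⟨⟨a, b⟩, hmem, hf⟩
    by_cases hc : pvRank.contains a = true
    · rw [if_pos hc] at hf
      cases hf
      exact ⟨hc, rfl, hmem⟩
    · simp [hc] at hf
  · rintro ⟨hc, rfl, hm⟩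
    exact ⟨(k, v), hm, by rw [if_pos hc]⟩

-- membership in the canonical triples
theorem pv_mem_canon (config : List (String × String)) (t : Int × String × String) :
    t ∈ pvCanon config ↔
      ((t.1, t.2.1) ∈ PySem.List.enumerate futTestConfigOpts 0 ∧
        (PySem.Dict.mk config).get? t.2.1 = some t.2.2) := by
  obtain ⟨i, k, v⟩ := t
  unfold pvCanon
  simp only [List.mem_filterMap, Option.map_eq_some_iff]
  constructor
  · rintro ⟨⟨a, b⟩, hmem, w, hw, hf⟩
    cases hf
    exact ⟨hmem, hw⟩
  · rintro ⟨hmem, hw⟩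
    exact ⟨(i, k), hmem, v, hw, rfl⟩

-- the keys of B's filtered pass form a sublist of config's keys
theorem pv_hits_keys (config : List (String × String)) :
    (config.filterMap (fun kv =>
        if pvRank.contains kv.1 then some (pvRank.getD kv.1 0, kv.1, kv.2) else none)).map
      (fun t => t.2.1)
    = (config.filter (fun kv => pvRank.contains kv.1)).map Prod.fst := by
  induction config with
  | nil => rfl
  | cons kv config ih =>
    simp only [List.filterMap_cons, List.filter_cons]
    by_cases hc : pvRank.contains kv.1 = true <;> simp [hc, ih]

theorem pv_B_eq_C (config : List (String × String)) (hpre : Pre_get_config_opts config) :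
    get_config_opts_alt config = pvC config := by
  simp only [get_config_opts_alt]
  rw [pv_rank_fold_eq]
  have hnodup_hits : (config.filterMap (fun kv =>
      if pvRank.contains kv.1 then some (pvRank.getD kv.1 0, kv.1, kv.2) else none)).Nodup := by
    refine List.Nodup.of_map (fun t => t.2.1) ?_
    rw [pv_hits_keys]
    exact (List.filter_sublist.map _).nodup hpre
  have hnodup_canon : (pvCanon config).Nodup :=
    List.Nodup.of_map _ (pv_canon_keys_nodup config)
  have hperm : (pvCanon config).Perm (config.filterMap (fun kv =>
      if pvRank.contains kv.1 then some (pvRank.getD kv.1 0, kv.1, kv.2) else none)) := by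
    rw [List.perm_ext_iff_of_nodup hnodup_canon hnodup_hits]
    intro t
    rw [pv_mem_canon, pv_mem_hits, pv_enum_char, pv_get?_iff_mem config hpre]
    constructor
    · rintro ⟨⟨hc, hi⟩, hm⟩
      exact ⟨hc, hi, hm⟩
    · rintro ⟨hc, hi, hm⟩
      exact ⟨⟨hc, hi⟩, hm⟩
  rw [PySem.List.sorted_eq_of_perm_of_pairwise_lt _ _ _ hperm (pv_canon_pairwise config),
    PySem.Dict.items_foldl_insert_fresh _ _ _ _ (by simp) (pv_canon_keys_nodup config),
    show (PySem.Dict.empty : PySem.Dict String String).items = [] from rfl, List.nil_append]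
  unfold pvCanon pvC
  exact pv_canon_proj config futTestConfigOpts 0

-- ===== VERDICT (by name: the statement is the Claim_ definition above) =====
theorem get_config_opts_spec : Claim_equal_get_config_opts := by
  intro config _ hpre
  unfold Spec_get_config_opts
  rw [pv_A_eq_C, pv_B_eq_C config hpre]
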